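-- pv_equiv track=rewrite | github.com/schneik80/PowerTools-Assembly | commands/bottomupupdate/entry.py | _extract_latest_bottom_up_order
-- ===== SOURCE A (Python) =====
-- def _extract_latest_bottom_up_order(log_lines):
--     """Extract the most recent Bottom-up order section from a log file."""
--     marker_indexes = [
--         i for i, line in enumerate(log_lines) if line.strip() == "Bottom-up order:"
--     ]
--     if not marker_indexes:
--         return []
--
--     start_idx = marker_indexes[-1] + 1
--     order = []
--     for line in log_lines[start_idx:]:
--         value = line.strip()
--         if not value or value == "Document save log:":
--             break
--         order.append(value)
--     return order
-- ===== SOURCE B (Python) =====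
-- def _extract_latest_bottom_up_order(log_lines):
--     """Extract the most recent Bottom-up order section from a log file."""
--     order = []
--     collecting = False
--     for line in log_lines:
--         value = line.strip()
--         if value == "Bottom-up order:":
--             order = []
--             collecting = True
--         elif collecting:
--             if not value or value == "Document save log:":
--                 collecting = False
--             else:
--                 order.append(value)
--     return order
-- ===== Notes on version B (the rewrite author's own statement) =====
-- stated objective: simpler
-- what changed: Replaces A's two-phase scheme (collect all marker indices via enumerate, index the last one, then re-scan a slice) with a single forward pass keeping an accumulator and a collecting flag that a later marker resets.
import Mathlib
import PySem

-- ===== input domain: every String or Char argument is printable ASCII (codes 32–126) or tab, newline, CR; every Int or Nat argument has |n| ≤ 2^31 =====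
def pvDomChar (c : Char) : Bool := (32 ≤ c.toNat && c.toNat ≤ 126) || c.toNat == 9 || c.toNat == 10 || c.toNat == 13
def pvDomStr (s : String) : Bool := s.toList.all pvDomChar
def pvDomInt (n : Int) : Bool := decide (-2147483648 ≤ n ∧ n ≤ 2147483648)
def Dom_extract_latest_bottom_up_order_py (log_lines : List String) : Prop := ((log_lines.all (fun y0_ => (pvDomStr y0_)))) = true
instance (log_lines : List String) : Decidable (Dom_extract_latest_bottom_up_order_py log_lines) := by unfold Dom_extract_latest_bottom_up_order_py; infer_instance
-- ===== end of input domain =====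

-- B replaces A's two-phase "find all marker indices, then re-scan a slice" with a single
-- forward pass keeping an accumulator and a collecting flag (objective: simpler one-pass decomposition).


-- ===== PORT A =====
-- A's trailing 'for … break' loop over the slice, as structural recursion
def pvCollectA : List String → List String
  | [] => []
  | line :: rest =>
    let value := PySem.Str.strip line
    if value = "" ∨ value = "Document save log:" then []
    else value :: pvCollectA rest

def extract_latest_bottom_up_order_py (log_lines : List String) : List String :=
  let marker_indexes : List Int :=
    (PySem.List.enumerate log_lines).filterMap
      (fun p => if PySem.Str.strip p.2 = "Bottom-up order:" then some p.1 else none)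
  if marker_indexes = [] then []
  else
    match PySem.List.pyGet? marker_indexes (-1) with
    | none => []  -- unreachable: the list is nonempty
    | some last =>
      let start_idx := last + 1
      pvCollectA (PySem.List.slice log_lines (some start_idx) none)

-- ===== PORT B =====
def pvStepB (st : List String × Bool) (line : String) : List String × Bool :=
  let value := PySem.Str.strip line
  if value = "Bottom-up order:" then ([], true)
  else if st.2 then
    if value = "" ∨ value = "Document save log:" then (st.1, false)
    else (st.1 ++ [value], st.2)
  else st

def extract_latest_bottom_up_order_py_alt (log_lines : List String) : List String :=
  (log_lines.foldl pvStepB ([], false)).1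

-- ===== PRECONDITION & SPEC =====
def Spec_extract_latest_bottom_up_order_py (log_lines : List String) (out : List String) : Prop := out = extract_latest_bottom_up_order_py_alt log_lines
instance (log_lines : List String) (out : List String) : Decidable (Spec_extract_latest_bottom_up_order_py log_lines out) := by unfold Spec_extract_latest_bottom_up_order_py; infer_instance

-- ===== CLAIM (what is proved, stated in full; the proofs are below) =====
def Claim_equal_extract_latest_bottom_up_order_py : Prop := ∀ (log_lines : List String), Dom_extract_latest_bottom_up_order_py log_lines → Spec_extract_latest_bottom_up_order_py log_lines (extract_latest_bottom_up_order_py log_lines)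

-- ===== LEMMAS AND PROOFS =====

-- the suffix after the LAST marker line, if any
def pvAfterLast : List String → Option (List String)
  | [] => none
  | x :: xs =>
    match pvAfterLast xs with
    | some t => some t
    | none => if PySem.Str.strip x = "Bottom-up order:" then some xs else none

-- whether B's pass is still collecting after running through xs (no marker in xs)
def pvNoStop : List String → Bool
  | [] => true
  | x :: xs =>
    if PySem.Str.strip x = "" ∨ PySem.Str.strip x = "Document save log:" then false
    else pvNoStop xs

def pvMI (s : Int) (xs : List String) : List Int :=
  (PySem.List.enumerate xs s).filterMap
    (fun p => if PySem.Str.strip p.2 = "Bottom-up order:" then some p.1 else none)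

-- the common specification both ports are reduced to
def pvSpecF (xs : List String) : List String :=
  match pvAfterLast xs with
  | none => []
  | some t => pvCollectA t

lemma pvB1 (xs : List String) (o : List String) (h : pvAfterLast xs = none) :
    List.foldl pvStepB (o, false) xs = (o, false) := by
  induction xs generalizing o with
  | nil => rfl
  | cons x xs ih =>
    simp only [pvAfterLast] at h
    rcases hx : pvAfterLast xs with _ | t
    · rw [hx] at h
      by_cases hm : PySem.Str.strip x = "Bottom-up order:"
      · simp [hm] at h
      · rw [List.foldl_cons]
        have hst : pvStepB (o, false) x = (o, false) := by simp [pvStepB, hm]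
        rw [hst]; exact ih o hx
    · rw [hx] at h; simp at h

lemma pvB2 (xs : List String) (o : List String) (h : pvAfterLast xs = none) :
    List.foldl pvStepB (o, true) xs = (o ++ pvCollectA xs, pvNoStop xs) := by
  induction xs generalizing o with
  | nil => simp [pvCollectA, pvNoStop]
  | cons x xs ih =>
    simp only [pvAfterLast] at h
    rcases hx : pvAfterLast xs with _ | t
    · rw [hx] at h
      by_cases hm : PySem.Str.strip x = "Bottom-up order:"
      · simp [hm] at h
      · rw [List.foldl_cons]
        by_cases hs : PySem.Str.strip x = "" ∨ PySem.Str.strip x = "Document save log:"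
        · have hst : pvStepB (o, true) x = (o, false) := by simp [pvStepB, hm, hs]
          rw [hst, pvB1 xs o hx]
          simp [pvCollectA, pvNoStop, hs]
        · have hst : pvStepB (o, true) x = (o ++ [PySem.Str.strip x], true) := by
            simp [pvStepB, hm, hs]
          rw [hst, ih (o ++ [PySem.Str.strip x]) hx]
          simp [pvCollectA, pvNoStop, hs]
    · rw [hx] at h; simp at h

lemma pvB3 (xs : List String) (t : List String) (st : List String × Bool)
    (h : pvAfterLast xs = some t) :
    List.foldl pvStepB st xs = (pvCollectA t, pvNoStop t) := by
  induction xs generalizing st with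
  | nil => simp [pvAfterLast] at h
  | cons x xs ih =>
    simp only [pvAfterLast] at h
    rcases hx : pvAfterLast xs with _ | t'
    · rw [hx] at h
      by_cases hm : PySem.Str.strip x = "Bottom-up order:"
      · rw [if_pos hm] at h
        cases h
        rw [List.foldl_cons]
        have hst : pvStepB st x = ([], true) := by simp [pvStepB, hm]
        rw [hst]
        simpa using pvB2 t [] hx
      · simp [hm] at h
    · rw [hx] at h
      simp only [Option.some.injEq] at h
      subst h
      rw [List.foldl_cons]
      exact ih _ hx

lemma pvAltEqSpec (xs : List String) :
    extract_latest_bottom_up_order_py_alt xs = pvSpecF xs := by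
  unfold extract_latest_bottom_up_order_py_alt pvSpecF
  rcases hx : pvAfterLast xs with _ | t
  · rw [pvB1 xs [] hx]
  · rw [pvB3 xs t _ hx]

lemma pvMI_key (xs : List String) (s : Nat) :
    (pvAfterLast xs = none → pvMI (s : Int) xs = []) ∧
    (∀ t, pvAfterLast xs = some t →
      ∃ k : Nat, (pvMI (s : Int) xs).getLast? = some ((s + k : Nat) : Int) ∧
        xs.drop (k + 1) = t) := by
  induction xs generalizing s with
  | nil => exact ⟨fun _ => rfl, fun t h => by simp [pvAfterLast] at h⟩
  | cons x xs ih =>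
    have hmi : pvMI (s : Int) (x :: xs) =
        (if PySem.Str.strip x = "Bottom-up order:" then [(s : Int)] else []) ++
          pvMI ((s + 1 : Nat) : Int) xs := by
      unfold pvMI
      rw [PySem.List.enumerate_cons]
      by_cases hm : PySem.Str.strip x = "Bottom-up order:" <;> simp [hm]
    constructor
    · intro h
      simp only [pvAfterLast] at h
      rcases hx : pvAfterLast xs with _ | t
      · rw [hx] at h
        by_cases hm : PySem.Str.strip x = "Bottom-up order:"
        · simp [hm] at h
        · rw [hmi, if_neg hm, List.nil_append]
          exact (ih (s + 1)).1 hx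
      · rw [hx] at h; simp at h
    · intro t h
      simp only [pvAfterLast] at h
      rcases hx : pvAfterLast xs with _ | t'
      · rw [hx] at h
        by_cases hm : PySem.Str.strip x = "Bottom-up order:"
        · rw [if_pos hm] at h
          cases h
          refine ⟨0, ?_, rfl⟩
          rw [hmi, if_pos hm, (ih (s + 1)).1 hx]
          simp
        · simp [hm] at h
      · rw [hx] at h
        simp only [Option.some.injEq] at h
        subst h
        obtain ⟨k, hlast, hdrop⟩ := (ih (s + 1)).2 t' hx
        refine ⟨k + 1, ?_, by simpa using hdrop⟩
        have hne : pvMI ((s + 1 : Nat) : Int) xs ≠ [] := by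
          intro hnil; rw [hnil] at hlast; simp at hlast
        rw [hmi, List.getLast?_append_of_ne_nil _ hne, hlast]
        congr 2
        omega

lemma pvAEqSpec (xs : List String) :
    extract_latest_bottom_up_order_py xs = pvSpecF xs := by
  unfold extract_latest_bottom_up_order_py pvSpecF
  have hmi : ((PySem.List.enumerate xs).filterMap
      (fun p => if PySem.Str.strip p.2 = "Bottom-up order:" then some p.1 else none))
      = pvMI ((0 : Nat) : Int) xs := by
    unfold pvMI; norm_num
  rw [hmi]
  rcases hx : pvAfterLast xs with _ | t
  · rw [(pvMI_key xs 0).1 hx]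
    simp
  · obtain ⟨k, hlast, hdrop⟩ := (pvMI_key xs 0).2 t hx
    have hne : pvMI ((0 : Nat) : Int) xs ≠ [] := by
      intro hnil; rw [hnil] at hlast; simp at hlast
    rw [if_neg hne, PySem.List.pyGet?_neg_one, hlast]
    simp only [Nat.zero_add]
    have : (k : Int) + 1 = ((k + 1 : Nat) : Int) := by push_cast; ring
    rw [this, PySem.List.slice_from_natCast, hdrop]

-- ===== VERDICT (by name: the statement is the Claim_ definition above) =====
theorem extract_latest_bottom_up_order_py_spec : Claim_equal_extract_latest_bottom_up_order_py := by
  intro log_lines _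
  unfold Spec_extract_latest_bottom_up_order_py
  rw [pvAEqSpec, pvAltEqSpec]
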